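-- pv_equiv track=rewrite | github.com/alexxyu/advent-of-code | 2022/day-17/answer.py | top_down_view
-- ===== SOURCE A (Python) =====
-- def top_down_view(grid):
--     view = [len(grid) for _ in range(7)]
--     for c in range(7):
--         n = 0
--         for r in grid:
--             if r[c] == '.':
--                 n += 1
--             else:
--                 break
--         view[c] = n
--     return tuple(view)
-- ===== SOURCE B (Python) =====
-- def top_down_view(grid):
--     counts = [0] * 7
--     active = list(range(7))
--     for row in grid:
--         if not active:
--             break
--         remaining = []
--         for c in active:
--             if row[c] == '.':
--                 counts[c] += 1
--                 remaining.append(c)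
--         active = remaining
--     return tuple(counts)
-- ===== Notes on version B (the rewrite author's own statement) =====
-- stated objective: alternative
-- what changed: B replaces A's seven column-major scans (each re-walking the rows with an early break) by a single row-major pass that carries the per-column counts and a shrinking list of still-active columns, stopping once every column is blocked.
import Mathlib
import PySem

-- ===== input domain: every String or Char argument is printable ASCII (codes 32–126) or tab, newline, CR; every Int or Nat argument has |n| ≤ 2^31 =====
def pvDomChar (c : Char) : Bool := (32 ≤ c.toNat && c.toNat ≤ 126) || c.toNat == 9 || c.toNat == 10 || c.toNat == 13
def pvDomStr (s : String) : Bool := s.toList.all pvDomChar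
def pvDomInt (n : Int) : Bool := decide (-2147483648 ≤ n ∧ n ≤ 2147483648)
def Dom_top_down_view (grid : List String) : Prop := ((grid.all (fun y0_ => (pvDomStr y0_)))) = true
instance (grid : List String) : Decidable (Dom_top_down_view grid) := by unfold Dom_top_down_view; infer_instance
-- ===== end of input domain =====

-- B changes the traversal: one row-major pass over the grid carrying the per-column
-- counts and a shrinking list of still-active columns, instead of A's seven
-- column-major scans; same cost, different structure.

-- ===== PORT A =====
-- A's inner loop: n = 0; for r in grid: if r[c] == '.': n += 1 else break.
-- (r[c] out of range is an IndexError in Python; the port stops the scan there —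
-- such grids are excluded by Pre_top_down_view.)
def aCol (c : Int) (n : Int) : List String → Int
  | [] => n
  | r :: rest =>
    match PySem.Str.pyGet? r c with
    | some ch => if ch = '.' then aCol c (n + 1) rest else n
    | none => n

def top_down_view (grid : List String) : List Int :=
  let view : List Int := (PySem.List.pyRange 0 7 1).map (fun _ => (grid.length : Int))
  let view := (PySem.List.pyRange 0 7 1).foldl (fun v c => v.set c.toNat (aCol c 0 grid)) view
  view

-- ===== PORT B =====
-- one row of B: for c in active: if row[c] == '.': counts[c] += 1; remaining.append(c)
-- (row[c] out of range is an IndexError in Python; the port skips the column there —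
-- such grids are excluded by Pre_top_down_view.)
def bRow (row : String) (counts : List Int) (active : List Int) : List Int × List Int :=
  active.foldl (fun p c =>
    match PySem.Str.pyGet? row c with
    | some ch =>
      if ch = '.' then
        (PySem.List.pySetD p.1 c (PySem.List.pyGetD p.1 c 0 + 1), p.2 ++ [c])
      else p
    | none => p) (counts, [])

def bLoop (counts active : List Int) : List String → List Int
  | [] => counts
  | row :: rest =>
    if active.isEmpty then counts
    else
      let p := bRow row counts active
      bLoop p.1 p.2 rest

def top_down_view_alt (grid : List String) : List Int :=
  bLoop (List.replicate 7 0) (PySem.List.pyRange 0 7 1) grid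

-- ===== PRECONDITION & SPEC =====
-- Pre_ is exactly A's return domain: whenever column c's downward scan reaches row i
-- (all earlier rows have a '.' at column c), row i must be longer than c; otherwise
-- Python A raises IndexError (and B raises IndexError on the same grids).
def Pre_top_down_view (grid : List String) : Prop :=
  ∀ c ∈ List.range 7, ∀ i ∈ List.range grid.length,
    (∀ j ∈ List.range i,
        c < ((grid[j]?.getD "").toList.length) ∧ (grid[j]?.getD "").toList[c]? = some '.') →
    c < ((grid[i]?.getD "").toList.length)
instance (grid : List String) : Decidable (Pre_top_down_view grid) := by
  unfold Pre_top_down_view; infer_instance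
def pvWitness_top_down_view : List String := ["..#....", ".......", "#.#.#.#"]

def Spec_top_down_view (grid : List String) (out : List Int) : Prop := out = top_down_view_alt grid
instance (grid : List String) (out : List Int) : Decidable (Spec_top_down_view grid out) := by unfold Spec_top_down_view; infer_instance

-- ===== CLAIM (what is proved, stated in full; the proofs are below) =====
def Claim_equal_top_down_view : Prop := ∀ (grid : List String), Dom_top_down_view grid → Pre_top_down_view grid → Spec_top_down_view grid (top_down_view grid)

-- ===== LEMMAS AND PROOFS =====

-- per-column result: (number of leading '.' rows in column c, whether the scan was cut short)
def colRes (c : Int) : List String → Int × Bool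
  | [] => (0, false)
  | r :: rest =>
    if PySem.Str.pyGet? r c = some '.' then
      let p := colRes c rest; (1 + p.1, p.2)
    else (0, true)

theorem aCol_eq_colRes (c : Int) (n : Int) (rows : List String) :
    aCol c n rows = n + (colRes c rows).1 := by
  induction rows generalizing n with
  | nil => simp [aCol, colRes]
  | cons r rest ih =>
    simp only [aCol, colRes]
    cases h : PySem.Str.pyGet? r c with
    | none => simp
    | some ch =>
      by_cases hch : ch = '.'
      · subst hch; simp [ih]; omega
      · simp [hch]

theorem getD_set (l : List Int) (n m : Nat) (v : Int) :
    (l.set n v).getD m 0 = if n = m ∧ n < l.length then v else l.getD m 0 := by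
  simp [List.getD, List.getElem?_set]
  split_ifs <;> simp_all <;> omega

theorem if_and_cons (k c : Int) (cs : List Int) (P : Prop) [Decidable P]
    (hkc : ¬ k = c) (a b : Int) :
    (if k ∈ cs ∧ P then a else b) = (if k ∈ c :: cs ∧ P then a else b) := by
  by_cases hm : k ∈ cs <;> by_cases hp : P <;>
    simp [List.mem_cons, hkc, hm, hp]

theorem bRow_aux (row : String) (active : List Int) (hnd : active.Nodup)
    (hb : ∀ c ∈ active, 0 ≤ c ∧ c < 7) :
    ∀ (counts acc : List Int), counts.length = 7 →
    (active.foldl (fun p c =>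
      match PySem.Str.pyGet? row c with
      | some ch =>
        if ch = '.' then
          (PySem.List.pySetD p.1 c (PySem.List.pyGetD p.1 c 0 + 1), p.2 ++ [c])
        else p
      | none => p) (counts, acc)).1.length = 7 ∧
    (active.foldl (fun p c =>
      match PySem.Str.pyGet? row c with
      | some ch =>
        if ch = '.' then
          (PySem.List.pySetD p.1 c (PySem.List.pyGetD p.1 c 0 + 1), p.2 ++ [c])
        else p
      | none => p) (counts, acc)).2
      = acc ++ active.filter (fun c => decide (PySem.Str.pyGet? row c = some '.')) ∧
    ∀ k : Nat, k < 7 →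
      (active.foldl (fun p c =>
        match PySem.Str.pyGet? row c with
        | some ch =>
          if ch = '.' then
            (PySem.List.pySetD p.1 c (PySem.List.pyGetD p.1 c 0 + 1), p.2 ++ [c])
          else p
        | none => p) (counts, acc)).1.getD k 0
        = if (k : Int) ∈ active ∧ PySem.Str.pyGet? row (k : Int) = some '.'
          then counts.getD k 0 + 1 else counts.getD k 0 := by
  induction active with
  | nil => intro counts acc hlen; simp [hlen]
  | cons c cs ih =>
    intro counts acc hlen
    have hc7 : 0 ≤ c ∧ c < 7 := hb c (by simp)
    have hcs : ∀ x ∈ cs, 0 ≤ x ∧ x < 7 := fun x hx => hb x (by simp [hx])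
    have hnotin : c ∉ cs := (List.nodup_cons.mp hnd).1
    have hnd' : cs.Nodup := (List.nodup_cons.mp hnd).2
    simp only [List.foldl_cons]
    cases h : PySem.Str.pyGet? row c with
    | none =>
      have hpc : (decide (PySem.Str.pyGet? row c = some ('.' : Char))) = false := by
        rw [h]; decide
      obtain ⟨h1, h2, h3⟩ := ih hnd' hcs counts acc hlen
      refine ⟨h1, ?_, ?_⟩
      · rw [h2, List.filter_cons, hpc]; simp
      · intro k hk
        rw [h3 k hk]
        by_cases hkc : (k : Int) = c
        · have hnd2 : ¬ PySem.Str.pyGet? row (k : Int) = some ('.' : Char) := by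
            rw [hkc, h]; simp
          rw [if_neg (fun hx => hnd2 hx.2), if_neg (fun hx => hnd2 hx.2)]
        · exact if_and_cons _ c cs _ hkc _ _
    | some ch =>
      by_cases hch : ch = '.'
      · subst hch
        have hpc : (decide (PySem.Str.pyGet? row c = some ('.' : Char))) = true := by
          rw [h]; decide
        simp only [reduceIte]
        have hset : PySem.List.pySetD counts c (PySem.List.pyGetD counts c 0 + 1)
            = counts.set c.toNat (counts.getD c.toNat 0 + 1) := by
          rw [PySem.List.pySetD_of_nonneg _ _ hc7.1,
              PySem.List.pyGetD_eq_getElem _ _ hc7.1 (by rw [hlen]; exact_mod_cast hc7.2),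
              List.getD_eq_getElem _ _ (by omega)]
        have hlen' : (counts.set c.toNat (counts.getD c.toNat 0 + 1)).length = 7 := by
          simp [hlen]
        obtain ⟨h1, h2, h3⟩ := ih hnd' hcs (counts.set c.toNat (counts.getD c.toNat 0 + 1)) (acc ++ [c]) hlen'
        rw [hset]
        refine ⟨h1, ?_, ?_⟩
        · rw [h2, List.filter_cons, hpc]; simp
        · intro k hk
          rw [h3 k hk, getD_set]
          by_cases hkc : (k : Int) = c
          · have hkn : c.toNat = k := by omega
            have hknotin : (k : Int) ∉ cs := by rw [hkc]; exact hnotin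
            have hdotk : PySem.Str.pyGet? row (k : Int) = some ('.' : Char) := by rw [hkc, h]
            rw [if_neg (fun hx => hknotin hx.1), if_pos ⟨hkn, by omega⟩,
                if_pos ⟨by simp [hkc], hdotk⟩, hkn]
          · have hkn : ¬ c.toNat = k := by omega
            rw [if_neg (show ¬(c.toNat = k ∧ c.toNat < counts.length) from fun hx => hkn hx.1)]
            exact if_and_cons _ c cs _ hkc _ _
      · have hpc : (decide (PySem.Str.pyGet? row c = some ('.' : Char))) = false := by
          rw [h]; simp [hch]
        simp only [if_neg hch]
        obtain ⟨h1, h2, h3⟩ := ih hnd' hcs counts acc hlen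
        refine ⟨h1, ?_, ?_⟩
        · rw [h2, List.filter_cons, hpc]; simp
        · intro k hk
          rw [h3 k hk]
          by_cases hkc : (k : Int) = c
          · have hnd2 : ¬ PySem.Str.pyGet? row (k : Int) = some ('.' : Char) := by
              rw [hkc, h]; simp [hch]
            rw [if_neg (fun hx => hnd2 hx.2), if_neg (fun hx => hnd2 hx.2)]
          · exact if_and_cons _ c cs _ hkc _ _

theorem bLoop_spec (rows : List String) :
    ∀ (counts active : List Int), counts.length = 7 → active.Nodup →
    (∀ c ∈ active, 0 ≤ c ∧ c < 7) →
    (bLoop counts active rows).length = 7 ∧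
    ∀ k : Nat, k < 7 → (bLoop counts active rows).getD k 0 =
      counts.getD k 0 + (if (k : Int) ∈ active then (colRes (k : Int) rows).1 else 0) := by
  induction rows with
  | nil => intro counts active hlen _ _; simp [bLoop, hlen, colRes]
  | cons row rest ih =>
    intro counts active hlen hnd hb
    by_cases hemp : active.isEmpty
    · have : active = [] := List.isEmpty_iff.mp hemp
      subst this
      simp [bLoop, hlen]
    · obtain ⟨h1, h2, h3⟩ := bRow_aux row active hnd hb counts [] hlen
      have hstep : bLoop counts active (row :: rest)
          = bLoop (bRow row counts active).1 (bRow row counts active).2 rest := by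
        simp [bLoop, hemp]
      have hfil : (bRow row counts active).2
          = active.filter (fun c => decide (PySem.Str.pyGet? row c = some '.')) := by
        unfold bRow; rw [h2]; simp
      have hndf : ((bRow row counts active).2).Nodup := by rw [hfil]; exact hnd.filter _
      have hbf : ∀ c ∈ (bRow row counts active).2, 0 ≤ c ∧ c < 7 := by
        intro x hx
        rw [hfil] at hx
        exact hb x (List.mem_of_mem_filter hx)
      obtain ⟨g1, g2⟩ := ih (bRow row counts active).1 (bRow row counts active).2 h1 hndf hbf
      refine ⟨by rw [hstep]; exact g1, ?_⟩
      intro k hk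
      rw [hstep, g2 k hk]
      have hcnt := h3 k hk
      have hcnt' : ((bRow row counts active).1).getD k 0
          = if (k : Int) ∈ active ∧ PySem.Str.pyGet? row (k : Int) = some '.'
            then counts.getD k 0 + 1 else counts.getD k 0 := hcnt
      rw [hcnt', hfil]
      by_cases hm : (k : Int) ∈ active
      · by_cases hdot : PySem.Str.pyGet? row (k : Int) = some '.'
        · simp only [colRes]
          simp at hdot
          simp [hm, hdot, List.mem_filter]
          omega
        · simp only [colRes]
          simp at hdot
          simp [hm, hdot, List.mem_filter]
      · simp [hm, List.mem_filter, colRes]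

-- ===== VERDICT =====
theorem top_down_view_spec : Claim_equal_top_down_view := by
  intro grid _ _
  unfold Spec_top_down_view
  have hA : top_down_view grid =
      [aCol 0 0 grid, aCol 1 0 grid, aCol 2 0 grid, aCol 3 0 grid, aCol 4 0 grid,
       aCol 5 0 grid, aCol 6 0 grid] := by
    simp [top_down_view, PySem.List.pyRange]
    rfl
  have hrange : PySem.List.pyRange 0 7 1 = [0, 1, 2, 3, 4, 5, 6] := by decide
  obtain ⟨hl, hg⟩ := bLoop_spec grid (List.replicate 7 0) (PySem.List.pyRange 0 7 1)
    (by simp) (by rw [hrange]; decide) (by rw [hrange]; decide)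
  have hB : ∀ k : Nat, k < 7 →
      (top_down_view_alt grid).getD k 0 = (colRes (k : Int) grid).1 := by
    intro k hk
    have := hg k hk
    unfold top_down_view_alt
    rw [this, hrange]
    interval_cases k <;> simp
  have hlalt : (top_down_view_alt grid).length = 7 := by
    unfold top_down_view_alt; exact hl
  rw [hA]
  apply List.ext_getElem (by simp [hlalt])
  intro i h1 h2
  have hi : i < 7 := by simpa using h1
  have hgi : (top_down_view_alt grid)[i] = (top_down_view_alt grid).getD i 0 := by
    rw [List.getD_eq_getElem]
  rw [hgi, hB i hi]
  interval_cases i <;> simp [aCol_eq_colRes]
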